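-- pv_equiv track=rewrite | github.com/Maxence56/Search-Engine-Project | gestion_lien.py | selection_articles_pour_suggestion
-- ===== SOURCE A (Python) =====
-- def insert(article, liste, graphe_points):
--   """
--   Cette fonction prend un article, une liste ordonnée par ordre décroissant, le dico indiquant le taux de similarité.
--   Elle renvoie la liste passé en paramètre avec l'article inseré dedans.
--   """
--   i = 0
--   mis = False
--   points_article = graphe_points[article]  #pour éviter d'avoir à toujours le rechercher dans le dictionnaire
--
--   while i<len(liste) and not mis:  #insertion de l'article
--     if graphe_points[liste[i]]<points_article:
--       liste = liste[:i]+[article]+liste[i:]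
--       mis = True
--     i+=1
--
--   if not mis: #si l'article n'a pas été rajouté, on le rajoute à la fin
--     liste = liste+[article]
--
--   return liste #le return est nécessaire
--
-- def selection_articles_pour_suggestion(graphe_points):
--   """
--   Cette fonction prend un graphe de point et renvoie la liste ordonnées des articles similaires par ordre décroissants de points (le premier à le nb max et le dernier le nb min)
--   """
--   liste_article = list(graphe_points.keys())
--
--   if liste_article==[]:
--       return []
--
--   resultat = [liste_article[0]]
--   for i in range(1, len(liste_article)):
--     resultat = insert(liste_article[i], resultat, graphe_points)
--   return resultat
-- ===== SOURCE B (Python) =====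
-- def selection_articles_pour_suggestion(graphe_points):
--   """
--   Renvoie la liste des articles par ordre decroissant de points (tri stable).
--   Groupement en une passe par valeur de points, puis concatenation des groupes
--   dans l'ordre decroissant des valeurs distinctes.
--   """
--   groups = {}
--   for article, points in graphe_points.items():
--     groups.setdefault(points, []).append(article)
--
--   resultat = []
--   for points in sorted(groups, reverse=True):
--     resultat += groups[points]
--   return resultat
-- ===== Notes on version B (the rewrite author's own statement) =====
-- stated objective: faster
-- what changed: Replaces the element-by-element insertion scan (repeated slicing plus a dict lookup per comparison) with a single grouping pass building a points->articles table, then one pass over the distinct point values sorted in descending order, concatenating the groups; ties keep insertion order in both.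
import Mathlib
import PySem

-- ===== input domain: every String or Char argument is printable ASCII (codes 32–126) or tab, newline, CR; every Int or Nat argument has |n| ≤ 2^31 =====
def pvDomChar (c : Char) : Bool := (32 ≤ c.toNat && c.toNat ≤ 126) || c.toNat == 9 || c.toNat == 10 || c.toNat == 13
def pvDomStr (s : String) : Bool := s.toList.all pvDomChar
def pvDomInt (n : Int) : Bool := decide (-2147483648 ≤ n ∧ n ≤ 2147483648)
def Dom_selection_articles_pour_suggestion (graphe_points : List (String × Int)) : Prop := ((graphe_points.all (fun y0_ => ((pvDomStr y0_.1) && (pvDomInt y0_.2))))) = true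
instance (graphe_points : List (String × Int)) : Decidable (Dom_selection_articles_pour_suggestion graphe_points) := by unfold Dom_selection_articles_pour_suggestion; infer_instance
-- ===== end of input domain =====

-- B replaces A's quadratic one-by-one insertion with a one-pass grouping table plus
-- a pass over the distinct point values sorted descending (objective: faster).

-- ===== PORT A =====
-- the while-loop of Python's `insert` as structural recursion over `liste`;
-- `graphe_points[liste[i]]` is ported as getD _ 0: every element of `liste` is a key
-- of the dict (they all come from keys()), so the KeyError branch is unreachable.
def pvInsertLoopA (g : PySem.Dict String Int) (article : String) (points_article : Int) :
    List String → List String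
  | [] => [article]                                   -- `mis` stayed False: append at the end
  | x :: xs =>
      if g.getD x 0 < points_article then article :: x :: xs
      else x :: pvInsertLoopA g article points_article xs

-- Python's `insert(article, liste, graphe_points)`
def pvInsertA (article : String) (liste : List String) (g : PySem.Dict String Int) : List String :=
  pvInsertLoopA g article (g.getD article 0) liste

def selection_articles_pour_suggestion (graphe_points : List (String × Int)) : List String :=
  let g : PySem.Dict String Int := PySem.Dict.mk graphe_points
  match g.keys with                                    -- liste_article = list(graphe_points.keys())
  | [] => []                                           -- if liste_article == []: return []
  | a :: rest =>                                       -- resultat = [liste_article[0]]; for i in range(1, …)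
      rest.foldl (fun resultat art => pvInsertA art resultat g) [a]

-- ===== PORT B =====
def selection_articles_pour_suggestion_alt (graphe_points : List (String × Int)) : List String :=
  -- groups.setdefault(points, []).append(article)
  let groups : PySem.Dict Int (List String) :=
    graphe_points.foldl (fun d p => d.modify p.2 [] (fun l => l ++ [p.1])) PySem.Dict.empty
  -- for points in sorted(groups, reverse=True): resultat += groups[points]
  (PySem.List.sorted groups.keys (fun v => v) true).foldl
    (fun resultat v => resultat ++ groups.getD v []) []

-- ===== PRECONDITION & SPEC =====
-- Pre_ excludes association lists with duplicate keys: they do not represent any Python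
-- dict[str,int] (a dict cannot hold a key twice), so no Python input corresponds to them.
def Pre_selection_articles_pour_suggestion (graphe_points : List (String × Int)) : Prop :=
  (graphe_points.map Prod.fst).Nodup
instance (graphe_points : List (String × Int)) : Decidable (Pre_selection_articles_pour_suggestion graphe_points) := by unfold Pre_selection_articles_pour_suggestion; infer_instance

def pvWitness_selection_articles_pour_suggestion : (List (String × Int)) :=
  [("a", 3), ("b", 5), ("c", 3)]

def Spec_selection_articles_pour_suggestion (graphe_points : List (String × Int)) (out : List String) : Prop := out = selection_articles_pour_suggestion_alt graphe_points
instance (graphe_points : List (String × Int)) (out : List String) : Decidable (Spec_selection_articles_pour_suggestion graphe_points out) := by unfold Spec_selection_articles_pour_suggestion; infer_instance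

-- ===== CLAIM (what is proved, stated in full; the proofs are below) =====
def Claim_equal_selection_articles_pour_suggestion : Prop := ∀ (graphe_points : List (String × Int)), Dom_selection_articles_pour_suggestion graphe_points → Pre_selection_articles_pour_suggestion graphe_points → Spec_selection_articles_pour_suggestion graphe_points (selection_articles_pour_suggestion graphe_points)

-- ===== LEMMAS AND PROOFS =====

-- The descending-stable comparison A's insertion uses, on (article, points) pairs.
def pvBef (x y : String × Int) : Bool := decide (y.2 < x.2)

-- insertBy passes over a prefix it never inserts before
theorem pvInsertBy_append {α : Type} (bef : α → α → Bool) (x : α) (ys zs : List α)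
    (h : ∀ y ∈ ys, bef x y = false) :
    PySem.List.insertBy bef x (ys ++ zs) = ys ++ PySem.List.insertBy bef x zs := by
  induction ys with
  | nil => simp
  | cons y ys ih =>
      simp only [List.cons_append, PySem.List.insertBy, h y (by simp)]
      simp only [Bool.false_eq_true, if_false, List.cons.injEq, true_and]
      exact ih (fun y hy => h y (by simp [hy]))

-- insertBy prepends when the head (if any) triggers the comparison
theorem pvInsertBy_cons {α : Type} (bef : α → α → Bool) (x : α) (zs : List α)
    (h : ∀ y, zs.head? = some y → bef x y = true) :
    PySem.List.insertBy bef x zs = x :: zs := by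
  cases zs with
  | nil => rfl
  | cons y ys => simp [PySem.List.insertBy, h y rfl]

-- A's inner while-loop on article names mirrors insertBy on (name, points) pairs,
-- provided the dict agrees with every pair carried in the accumulator.
theorem pvInsertLoop_map (g : PySem.Dict String Int) (a : String) (v : Int)
    (acc : List (String × Int)) (hacc : ∀ q ∈ acc, g.getD q.1 0 = q.2) :
    pvInsertLoopA g a v (acc.map Prod.fst)
      = (PySem.List.insertBy pvBef (a, v) acc).map Prod.fst := by
  induction acc with
  | nil => rfl
  | cons q qs ih =>
      have hq : g.getD q.1 0 = q.2 := hacc q (by simp)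
      simp only [List.map_cons, pvInsertLoopA, PySem.List.insertBy, pvBef, hq]
      by_cases h : q.2 < v
      · simp [h]
      · simp only [h, decide_false, Bool.false_eq_true, if_false, List.map_cons,
          List.cons.injEq, true_and]
        exact ih (fun r hr => hacc r (by simp [hr]))

-- A's outer for-loop mirrors the insertBy fold on pairs.
theorem pvFoldA (g : PySem.Dict String Int) (l : List (String × Int))
    (hl : ∀ p ∈ l, g.getD p.1 0 = p.2) :
    ∀ acc : List (String × Int), (∀ q ∈ acc, g.getD q.1 0 = q.2) →
    (l.map Prod.fst).foldl (fun res art => pvInsertA art res g) (acc.map Prod.fst)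
      = (l.foldl (fun acc p => PySem.List.insertBy pvBef p acc) acc).map Prod.fst := by
  induction l with
  | nil => intro acc _; simp
  | cons p ps ih =>
      intro acc hacc
      have hp : g.getD p.1 0 = p.2 := hl p (by simp)
      have hstep : pvInsertA p.1 (acc.map Prod.fst) g
          = (PySem.List.insertBy pvBef p acc).map Prod.fst := by
        simpa [pvInsertA, hp] using pvInsertLoop_map g p.1 p.2 acc hacc
      simp only [List.map_cons, List.foldl_cons, hstep]
      exact ih (fun q hq => hl q (by simp [hq]))
        (PySem.List.insertBy pvBef p acc)
        (fun q hq => by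
          rcases (PySem.List.mem_insertBy pvBef p q acc).1 hq with h | h
          · subst h; exact hp
          · exact hacc q h)

-- under Nodup keys, A is (stable descending sort of the pairs by points), names only
theorem pvA_eq_sorted (gp : List (String × Int))
    (hnd : (gp.map Prod.fst).Nodup) :
    selection_articles_pour_suggestion gp
      = (PySem.List.sorted gp (fun p => p.2) true).map Prod.fst := by
  rw [PySem.List.sorted_rev_eq_foldl_insertBy]
  cases gp with
  | nil => rfl
  | cons hd ps =>
      have hget : ∀ r ∈ hd :: ps, (PySem.Dict.mk (hd :: ps)).getD r.1 0 = r.2 := by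
        intro r hr
        exact PySem.Dict.getD_of_mem_items (PySem.Dict.mk (hd :: ps)) (k := r.1) (v := r.2) hr hnd 0
      have hmain : (ps.map Prod.fst).foldl
            (fun r art => pvInsertA art r (PySem.Dict.mk (hd :: ps))) ([hd].map Prod.fst)
          = (ps.foldl (fun acc q => PySem.List.insertBy pvBef q acc) [hd]).map Prod.fst :=
        pvFoldA (PySem.Dict.mk (hd :: ps)) ps
          (fun q hq => hget q (by simp [hq])) [hd]
          (fun q hq => by
            have h := List.mem_singleton.1 hq
            subst h
            exact hget q (by simp))
      exact hmain

-- inserting (a,v) into a strictly-descending concatenation of value groups: if v is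
-- among the group values it lands at the end of its group, otherwise at the position
-- of v in the descending value list.
theorem pvInsertBy_flatMap_mem (a : String) (v : Int) :
    ∀ (vs : List Int), vs.Pairwise (fun x y => y < x) →
    ∀ (f : Int → List (String × Int)), (∀ w ∈ vs, ∀ q ∈ f w, q.2 = w) →
    (∀ w ∈ vs, f w ≠ []) → v ∈ vs →
    PySem.List.insertBy pvBef (a, v) (vs.flatMap f)
      = vs.flatMap (fun w => f w ++ if v = w then [(a, v)] else []) := by
  intro vs
  induction vs with
  | nil => intro _ _ _ _ hv; exact absurd hv (by simp)
  | cons w rest ih =>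
      intro hpw f hf hne hv
      have hpw' : rest.Pairwise (fun x y => y < x) := hpw.of_cons
      have hlt : ∀ u ∈ rest, u < w := fun u hu => List.rel_of_pairwise_cons hpw hu
      simp only [List.flatMap_cons]
      by_cases hwv : w = v
      · subst hwv
        -- pass over f w (values = w, not < w), then insert before the rest (< w) or at the end
        rw [pvInsertBy_append pvBef (a, w) (f w) (rest.flatMap f)
            (fun y hy => by
              have := hf w (by simp) y hy
              simp [pvBef, this])]
        have hins : PySem.List.insertBy pvBef (a, w) (rest.flatMap f) = (a, w) :: rest.flatMap f := by
          apply pvInsertBy_cons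
          intro y hy
          have hmem : y ∈ rest.flatMap f := List.mem_of_mem_head? hy
          rcases List.mem_flatMap.1 hmem with ⟨u, hu, hyu⟩
          have : y.2 = u := hf u (by simp [hu]) y hyu
          simp [pvBef, this, hlt u hu]
        rw [hins]
        have hrest : rest.flatMap (fun u => f u ++ if w = u then [(a, w)] else []) = rest.flatMap f := by
          apply List.flatMap_congr
          intro u hu
          have : ¬ (w = u) := fun h => absurd (hlt u hu) (by simp [h])
          simp [this]
        simp [hrest]
      · -- v ∈ rest, so v < w; pass over f w
        have hvrest : v ∈ rest := by rcases List.mem_cons.1 hv with h | h; exact absurd h.symm hwv; exact h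
        rw [pvInsertBy_append pvBef (a, v) (f w) (rest.flatMap f)
            (fun y hy => by
              have h2 : y.2 = w := hf w (by simp) y hy
              have : ¬ (w < v) := not_lt.2 (le_of_lt (hlt v hvrest))
              simp [pvBef, h2, this])]
        have : ¬ (v = w) := fun h => hwv h.symm
        rw [ih hpw' f (fun u hu => hf u (by simp [hu])) (fun u hu => hne u (by simp [hu])) hvrest]
        simp [this]

theorem pvInsertBy_flatMap_not_mem (a : String) (v : Int) :
    ∀ (vs : List Int), vs.Pairwise (fun x y => y < x) →
    ∀ (f : Int → List (String × Int)), (∀ w ∈ vs, ∀ q ∈ f w, q.2 = w) →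
    (∀ w ∈ vs, f w ≠ []) → v ∉ vs → f v = [] →
    PySem.List.insertBy pvBef (a, v) (vs.flatMap f)
      = (PySem.List.insertBy (fun x y => decide (y < x)) v vs).flatMap
          (fun w => f w ++ if v = w then [(a, v)] else []) := by
  intro vs
  induction vs with
  | nil => intro _ _ _ _ _ hfv; simp [PySem.List.insertBy, hfv]
  | cons w rest ih =>
      intro hpw f hf hne hv hfv
      have hpw' : rest.Pairwise (fun x y => y < x) := hpw.of_cons
      have hwv : w ≠ v := fun h => hv (by simp [h])
      have hvrest : v ∉ rest := fun h => hv (by simp [h])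
      simp only [List.flatMap_cons]
      by_cases hc : w < v
      · -- v goes first: head of f w has value w < v
        have hhead : PySem.List.insertBy pvBef (a, v) (f w ++ rest.flatMap f)
            = (a, v) :: (f w ++ rest.flatMap f) := by
          apply pvInsertBy_cons
          intro y hy
          have hmem : y ∈ f w ++ rest.flatMap f := List.mem_of_mem_head? hy
          rcases List.mem_append.1 hmem with h | h
          · have : y.2 = w := hf w (by simp) y h
            simp [pvBef, this, hc]
          · rcases List.mem_flatMap.1 h with ⟨u, hu, hyu⟩
            have h2 : y.2 = u := hf u (by simp [hu]) y hyu
            have : u < w := List.rel_of_pairwise_cons hpw hu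
            simp [pvBef, h2, lt_trans this hc]
        rw [hhead]
        have hstep : PySem.List.insertBy (fun x y => decide (y < x)) v (w :: rest) = v :: w :: rest := by
          simp [PySem.List.insertBy, hc]
        rw [hstep]
        have hrest : rest.flatMap (fun u => f u ++ if v = u then [(a, v)] else []) = rest.flatMap f := by
          apply List.flatMap_congr
          intro u hu
          have : ¬ (v = u) := fun h => hvrest (h ▸ hu)
          simp [this]
        simp [hfv, hrest, hwv.symm]
      · -- v stays after w
        have hvw : v < w := lt_of_le_of_ne (not_lt.1 hc) (fun h => hwv h.symm)
        rw [pvInsertBy_append pvBef (a, v) (f w) (rest.flatMap f)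
            (fun y hy => by
              have h2 : y.2 = w := hf w (by simp) y hy
              simp [pvBef, h2, not_lt.2 (le_of_lt hvw)])]
        have hstep : PySem.List.insertBy (fun x y => decide (y < x)) v (w :: rest)
            = w :: PySem.List.insertBy (fun x y => decide (y < x)) v rest := by
          simp [PySem.List.insertBy, hc]
        rw [hstep]
        simp only [List.flatMap_cons]
        rw [ih hpw' f (fun u hu => hf u (by simp [hu])) (fun u hu => hne u (by simp [hu])) hvrest hfv]
        have : ¬ (v = w) := fun h => hwv h.symm
        simp [this]

-- the grouped form equals the stable descending sort (on pairs)
theorem pvGrouped_eq_sorted (l : List (String × Int)) :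
    (PySem.List.sorted (PySem.Set.ofList (l.map Prod.snd)) (fun v => v) true).flatMap
        (fun v => l.filter (fun p => p.2 == v))
      = PySem.List.sorted l (fun p => p.2) true := by
  induction l using List.reverseRecOn with
  | nil => simp [PySem.Set.ofList, PySem.List.sorted]
  | append_singleton l p ih =>
      obtain ⟨a, v⟩ := p
      -- right side: one more insertBy step
      have hR : PySem.List.sorted (l ++ [(a, v)]) (fun p => p.2) true
          = PySem.List.insertBy pvBef (a, v) (PySem.List.sorted l (fun p => p.2) true) := by
        rw [PySem.List.sorted_rev_eq_foldl_insertBy, PySem.List.sorted_rev_eq_foldl_insertBy,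
          List.foldl_append]
        rfl
      set vs := PySem.List.sorted (PySem.Set.ofList (l.map Prod.snd)) (fun v => v) true with hvs
      have hpw : vs.Pairwise (fun x y : Int => y < x) := by
        have h1 : vs.Pairwise (fun x y : Int => y ≤ x) :=
          PySem.List.sorted_pairwise_rev _ _
        have h2 : vs.Nodup :=
          ((PySem.List.sorted_perm (PySem.Set.ofList (l.map Prod.snd)) (fun v => v) true).nodup_iff).2
            (PySem.Set.nodup_ofList _)
        exact (List.pairwise_and_iff.2 ⟨h2, h1⟩).imp (fun h => lt_of_le_of_ne h.2 (Ne.symm h.1))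
      have hmemvs : ∀ w, w ∈ vs ↔ w ∈ l.map Prod.snd := by
        intro w
        rw [hvs, PySem.List.mem_sorted, PySem.Set.mem_ofList]
      have hf : ∀ w ∈ vs, ∀ q ∈ l.filter (fun p => p.2 == w), q.2 = w := by
        intro w _ q hq
        simpa using (List.mem_filter.1 hq).2
      have hne : ∀ w ∈ vs, l.filter (fun p => p.2 == w) ≠ [] := by
        intro w hw
        rcases List.mem_map.1 ((hmemvs w).1 hw) with ⟨q, hq, hq2⟩
        exact List.ne_nil_of_mem (List.mem_filter.2 ⟨hq, by simp [hq2]⟩)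
      have hfilter : ∀ w : Int, (l ++ [(a, v)]).filter (fun p => p.2 == w)
          = l.filter (fun p => p.2 == w) ++ if v = w then [(a, v)] else [] := by
        intro w
        rw [List.filter_append]
        by_cases h : v = w <;> simp [h]
      by_cases hv : v ∈ l.map Prod.snd
      · -- value already present: the distinct-value list is unchanged
        have hset : PySem.Set.ofList ((l ++ [(a, v)]).map Prod.snd)
            = PySem.Set.ofList (l.map Prod.snd) := by
          rw [List.map_append]
          simp only [List.map_cons, List.map_nil]
          rw [PySem.Set.ofList_append_singleton, PySem.Set.add_of_mem (by simpa [PySem.Set.mem_ofList] using hv)]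
        rw [hset, ← hvs, hR, ← ih]
        rw [pvInsertBy_flatMap_mem a v vs hpw _ hf hne ((hmemvs v).2 hv)]
        exact List.flatMap_congr (fun w _ => hfilter w)
      · -- new value: it is appended to the set, i.e. inserted into the sorted value list
        have hset : PySem.Set.ofList ((l ++ [(a, v)]).map Prod.snd)
            = PySem.Set.ofList (l.map Prod.snd) ++ [v] := by
          rw [List.map_append]
          simp only [List.map_cons, List.map_nil]
          rw [PySem.Set.ofList_append_singleton, PySem.Set.add_of_not_mem (by simpa [PySem.Set.mem_ofList] using hv)]
        have hsortvs : PySem.List.sorted (PySem.Set.ofList (l.map Prod.snd) ++ [v]) (fun v => v) true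
            = PySem.List.insertBy (fun x y => decide (y < x)) v vs := by
          rw [hvs, PySem.List.sorted_rev_eq_foldl_insertBy, PySem.List.sorted_rev_eq_foldl_insertBy,
            List.foldl_append]
          rfl
        have hfv : l.filter (fun p => p.2 == v) = [] := by
          rw [List.filter_eq_nil_iff]
          intro q hq hq2
          exact hv (List.mem_map.2 ⟨q, hq, by simpa using hq2⟩)
        rw [hset, hsortvs, hR, ← ih]
        rw [pvInsertBy_flatMap_not_mem a v vs hpw _ hf hne (fun h => hv ((hmemvs v).1 h)) hfv]
        exact List.flatMap_congr (fun w _ => hfilter w)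

-- B computes the grouped form, names only
theorem pvB_eq_sorted (gp : List (String × Int)) :
    selection_articles_pour_suggestion_alt gp
      = (PySem.List.sorted gp (fun p => p.2) true).map Prod.fst := by
  unfold selection_articles_pour_suggestion_alt
  simp only []
  set groups : PySem.Dict Int (List String) :=
    gp.foldl (fun d p => d.modify p.2 [] (fun l => l ++ [p.1])) PySem.Dict.empty with hgroups
  have hswap : groups = (gp.map (fun p => (p.2, p.1))).foldl
      (fun d p => d.modify p.1 [] (fun l => l ++ [p.2])) PySem.Dict.empty := by
    rw [hgroups, List.foldl_map]
  have hgetD : ∀ v : Int, groups.getD v []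
      = (gp.filter (fun p => p.2 == v)).map Prod.fst := by
    intro v
    rw [hswap, PySem.Dict.getD_foldl_modify_append]
    rw [List.filter_map]
    simp [PySem.Dict.getD_empty, List.map_map, Function.comp_def]
  have hkeys : groups.keys = PySem.Set.ofList (gp.map Prod.snd) := by
    rw [hgroups]
    rw [PySem.Dict.keys_foldl_modify_key gp (fun p => p.2) ([] : List String)
      (fun _ p l => l ++ [p.1]) PySem.Dict.empty]
    simp [PySem.Dict.keys_empty, PySem.Set.update_nil_left]
  rw [PySem.List.foldl_append_eq_flatMap (fun v => groups.getD v [])]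
  rw [List.nil_append, hkeys]
  have : (PySem.List.sorted (PySem.Set.ofList (gp.map Prod.snd)) (fun v => v) true).flatMap
      (fun v => groups.getD v [])
    = (PySem.List.sorted (PySem.Set.ofList (gp.map Prod.snd)) (fun v => v) true).flatMap
      (fun v => (gp.filter (fun p => p.2 == v)).map Prod.fst) :=
    List.flatMap_congr (fun v _ => hgetD v)
  rw [this, ← List.map_flatMap, pvGrouped_eq_sorted]

-- ===== VERDICT (by name: the statement is the Claim_ definition above) =====
theorem selection_articles_pour_suggestion_spec : Claim_equal_selection_articles_pour_suggestion := by
  intro gp _ hpre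
  unfold Spec_selection_articles_pour_suggestion
  rw [pvA_eq_sorted gp hpre, pvB_eq_sorted gp]
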